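-- pv_equiv track=rewrite | github.com/miliar/Code_Jam_Webscraper | solutions_python/solutions_year10_round1_nr1/38.py | check_horiz
-- ===== SOURCE A (Python) =====
-- def tr(n, x, y):
--     return (y * n) + x
--
-- def check_horiz(n, k, rot, c):
--     for y in range(n):
--         count = 0
--         for x in range(n):
--             if rot[tr(n, x, y)] == c:
--                 count += 1
--                 if count == k:
--                     return True
--             else:
--                 count = 0
--     return False
-- ===== SOURCE B (Python) =====
-- def row_has_run(row, c, k):
--     while row:
--         j = 1
--         while j < len(row) and row[j] == row[0]:
--             j += 1
--         if row[0] == c and j >= k: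
--             return True
--         row = row[j:]
--     return False
--
-- def check_horiz(n, k, rot, c):
--     if k <= 0:
--         return False
--     for y in range(n):
--         if row_has_run(rot[y * n:(y + 1) * n], c, k):
--             return True
--     return False
-- ===== Notes on version B (the rewrite author's own statement) =====
-- stated objective: alternative
-- what changed: B slices each row out of the flat list and segments it into maximal runs of equal cells (returning True when a run of colour c has length >= k, with an explicit k <= 0 guard), instead of A's per-cell reset counter over computed flat indices.
-- outside the precondition, e.g. on check_horiz(2, 1, ['a'], 'a'): A returns True, B returns True
import Mathlib
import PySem

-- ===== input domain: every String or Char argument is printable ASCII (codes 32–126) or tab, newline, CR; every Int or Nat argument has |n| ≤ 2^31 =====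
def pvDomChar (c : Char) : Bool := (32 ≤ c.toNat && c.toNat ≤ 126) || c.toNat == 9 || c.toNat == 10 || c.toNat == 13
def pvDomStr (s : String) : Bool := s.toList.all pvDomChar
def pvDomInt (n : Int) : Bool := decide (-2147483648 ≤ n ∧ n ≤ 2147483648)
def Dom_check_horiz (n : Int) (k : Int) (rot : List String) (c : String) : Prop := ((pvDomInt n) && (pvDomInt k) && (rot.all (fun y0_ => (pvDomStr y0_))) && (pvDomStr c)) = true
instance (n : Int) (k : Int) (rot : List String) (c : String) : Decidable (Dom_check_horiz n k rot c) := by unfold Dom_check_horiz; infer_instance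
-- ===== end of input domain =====

-- B re-implements A by slicing each row and scanning its maximal runs of equal cells
-- (different decomposition, same cost); equivalence of the return values is proved on Pre_.

-- ===== PORT A =====
def tr (n : Int) (x : Int) (y : Int) : Int := y * n + x

-- one step of A's inner loop: state = none once 'return True' fired, else the current count
def chStep (k : Int) (c : String) (st : Option Int) (v : String) : Option Int :=
  match st with
  | none => none
  | some count =>
    if v == c then (if count + 1 == k then none else some (count + 1)) else some 0

-- A's inner 'for x in range(n)' over row y (pyGetD is exact here: Pre_ keeps every index in range)
def chInner (n : Int) (k : Int) (rot : List String) (c : String) (y : Int) : Option Int :=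
  (PySem.List.pyRange 0 n 1).foldl
    (fun st x => chStep k c st (PySem.List.pyGetD rot (tr n x y) "")) (some 0)

def check_horiz (n : Int) (k : Int) (rot : List String) (c : String) : Bool :=
  (PySem.List.pyRange 0 n 1).any (fun y => (chInner n k rot c y).isNone)

-- ===== PORT B =====
-- Source B's row_has_run: strip off the leading maximal run; True iff it is a c-run of length ≥ k
def row_has_run (c : String) (k : Int) : List String → Bool
  | [] => false
  | v :: rest =>
    let t := (rest.takeWhile (fun w => w == v)).length
    ((v == c) && decide (k ≤ 1 + (t : Int))) || row_has_run c k (rest.drop t)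
  termination_by l => l.length
  decreasing_by simp

def check_horiz_alt (n : Int) (k : Int) (rot : List String) (c : String) : Bool :=
  if k ≤ 0 then false
  else
    (PySem.List.pyRange 0 n 1).any (fun y =>
      row_has_run c k (PySem.List.slice rot (some (y * n)) (some ((y + 1) * n))))

-- ===== PRECONDITION & SPEC =====
-- A raises IndexError when it reaches an index ≥ len(rot) (possible as soon as n > 0 and
-- len(rot) < n*n); Pre_ requires all n*n cells to exist. This also excludes some inputs where
-- A happens to return True before reaching a missing cell (see the cite in claim.json).
def Pre_check_horiz (n : Int) (k : Int) (rot : List String) (c : String) : Prop :=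
  n ≤ 0 ∨ n * n ≤ (rot.length : Int)
instance (n : Int) (k : Int) (rot : List String) (c : String) : Decidable (Pre_check_horiz n k rot c) := by unfold Pre_check_horiz; infer_instance

def pvWitness_check_horiz : Int × Int × List String × String := (2, 2, ["a", "a", "b", "b"], "a")

def Spec_check_horiz (n : Int) (k : Int) (rot : List String) (c : String) (out : Bool) : Prop := out = check_horiz_alt n k rot c
instance (n : Int) (k : Int) (rot : List String) (c : String) (out : Bool) : Decidable (Spec_check_horiz n k rot c out) := by unfold Spec_check_horiz; infer_instance

-- ===== CLAIM (what is proved, stated in full; the proofs are below) =====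
def Claim_equal_check_horiz : Prop := ∀ (n : Int) (k : Int) (rot : List String) (c : String), Dom_check_horiz n k rot c → Pre_check_horiz n k rot c → Spec_check_horiz n k rot c (check_horiz n k rot c)

-- ===== LEMMAS AND PROOFS =====

-- once A's inner loop has 'returned True' (state none), it stays none
lemma foldl_chStep_none (k : Int) (c : String) (row : List String) :
    row.foldl (chStep k c) none = none := by
  induction row with
  | nil => rfl
  | cons v rest ih => simpa [chStep] using ih

-- with k ≤ 0 A's inner loop can never fire (count+1 ≥ 1 > k)
lemma foldl_chStep_kle (k : Int) (c : String) (hk : k ≤ 0) :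
    ∀ (row : List String) (count : Int), 0 ≤ count →
      (row.foldl (chStep k c) (some count)).isNone = false := by
  intro row
  induction row with
  | nil => intro count _; rfl
  | cons v rest ih =>
    intro count hc
    by_cases hv : v == c
    · have hne : ¬ (count + 1 == k) = true := by
        simp only [beq_iff_eq]; omega
      simp only [List.foldl_cons, chStep, hv, if_neg hne, if_true]
      exact ih (count + 1) (by omega)
    · simp only [List.foldl_cons, chStep, hv]
      simpa using ih 0 le_rfl

-- dropWhile is dropping the takeWhile prefix (assembled from takeWhile_append_dropWhile + drop_left)
lemma dropWhile_eq_drop (p : String → Bool) (l : List String) :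
    l.dropWhile p = l.drop (l.takeWhile p).length := by
  rw [show l.drop (l.takeWhile p).length
        = ((l.takeWhile p ++ l.dropWhile p).drop (l.takeWhile p).length) from by
      rw [List.takeWhile_append_dropWhile]]
  rw [List.drop_left]

-- skipping one non-c cell does not change B's row verdict
lemma row_has_run_cons_ne (c : String) (k : Int) (v : String) (rest : List String)
    (hv : (v == c) = false) :
    row_has_run c k (v :: rest) = row_has_run c k rest := by
  cases rest with
  | nil =>
    rw [row_has_run, row_has_run]
    simp [hv]
    rw [row_has_run]
  | cons w rest₂ =>
    by_cases hw : (w == v) = true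
    · have hwv : w = v := by simpa [beq_iff_eq] using hw
      have hwc : (w == c) = false := by subst hwv; exact hv
      rw [row_has_run, row_has_run]
      simp only [List.takeWhile_cons, hw, if_true, List.length_cons, List.drop_succ_cons]
      simp [hv, hwv]
    · rw [row_has_run]
      simp [hw, hv]

-- B's verdict, split at the leading c-run (definitional for k ≥ 1)
lemma row_has_run_char (c : String) (k : Int) (hk : 1 ≤ k) (row : List String) :
    (decide (k ≤ ((row.takeWhile (fun w => w == c)).length : Int)) ||
      row_has_run c k (row.dropWhile (fun w => w == c))) = row_has_run c k row := by
  cases row with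
  | nil =>
    simp only [List.takeWhile_nil, List.dropWhile_nil, List.length_nil, Int.natCast_zero]
    rw [row_has_run]
    simp
    omega
  | cons v rest =>
    by_cases hv : (v == c) = true
    · have hvc : v = c := by simpa [beq_iff_eq] using hv
      rw [row_has_run]
      simp only [List.takeWhile_cons, List.dropWhile_cons, hv, if_true, List.length_cons]
      have hdw : rest.dropWhile (fun w => w == c) =
          rest.drop (rest.takeWhile (fun w => w == v)).length := by
        rw [hvc]; exact dropWhile_eq_drop _ rest
      rw [hdw, hvc]
      congr 1
      simp only [Bool.true_and]
      have : (k ≤ ((rest.takeWhile (fun w => w == c)).length : Int) + 1) ↔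
          (k ≤ 1 + ((rest.takeWhile (fun w => w == c)).length : Int)) := by omega
      simp [Int.add_comm]
    · have hvf : (v == c) = false := by simpa using hv
      simp only [List.takeWhile_cons, List.dropWhile_cons, hvf, if_false, Bool.false_eq_true,
        List.length_nil, Int.natCast_zero]
      rw [row_has_run_cons_ne c k v rest hvf]
      simp
      omega

-- A's inner loop on an explicit row list equals B's run scan (k ≥ 1, invariant 0 ≤ count < k)
lemma foldl_chStep_eq (k : Int) (c : String) (hk : 1 ≤ k) :
    ∀ (row : List String) (count : Int), 0 ≤ count → count < k →
      (row.foldl (chStep k c) (some count)).isNone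
      = (decide (k ≤ count + ((row.takeWhile (fun w => w == c)).length : Int)) ||
          row_has_run c k (row.dropWhile (fun w => w == c))) := by
  intro row
  induction row with
  | nil =>
    intro count h0 hck
    simp only [List.foldl_nil, Option.isNone_some, List.takeWhile_nil, List.dropWhile_nil,
      List.length_nil, Int.natCast_zero]
    rw [row_has_run]
    simp
    omega
  | cons v rest ih =>
    intro count h0 hck
    by_cases hv : (v == c) = true
    · simp only [List.foldl_cons, chStep, hv, if_true, List.takeWhile_cons,
        List.dropWhile_cons, List.length_cons]
      by_cases he : count + 1 = k
      · have : (count + 1 == k) = true := by simpa [beq_iff_eq] using he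
        rw [if_pos this, foldl_chStep_none]
        have : (k ≤ count + (((rest.takeWhile (fun w => w == c)).length : Int) + 1)) := by
          have := Int.natCast_nonneg (rest.takeWhile (fun w => w == c)).length
          omega
        simp [this]
      · have hne : ¬ (count + 1 == k) = true := by simpa [beq_iff_eq] using he
        rw [if_neg hne]
        rw [ih (count + 1) (by omega) (by omega)]
        congr 1
        have : (k ≤ count + 1 + ((rest.takeWhile (fun w => w == c)).length : Int)) ↔
            (k ≤ count + (((rest.takeWhile (fun w => w == c)).length : Int) + 1)) := by omega
        simp [this]
    · have hvf : (v == c) = false := by simpa using hv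
      simp only [List.foldl_cons, chStep, hvf, Bool.false_eq_true, if_false,
        List.takeWhile_cons, List.dropWhile_cons]
      rw [ih 0 le_rfl (by omega)]
      simp only [Int.zero_add, List.length_nil, Int.natCast_zero]
      rw [row_has_run_char c k hk rest, row_has_run_cons_ne c k v rest hvf]
      have : ¬ (k ≤ count) := by omega
      simp [this]

-- the cells A reads in row y are exactly B's slice of row y
lemma map_get_range (rot : List String) (s : Int) (m : Nat) (hs : 0 ≤ s)
    (hm : s + m ≤ (rot.length : Int)) :
    (List.range m).map (fun (i : Nat) => PySem.List.pyGetD rot (s + (i : Int)) "")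
      = (rot.drop s.toNat).take m := by
  apply List.ext_getElem
  · simp; omega
  · intro i h1 h2
    simp only [List.length_map, List.length_range] at h1
    simp only [List.getElem_map, List.getElem_range, List.getElem_take, List.getElem_drop]
    rw [PySem.List.pyGetD_eq_getElem]
    · congr 1; omega
    · omega
    · omega

lemma chInner_eq_row (n : Int) (k : Int) (rot : List String) (c : String) (y : Int)
    (hy0 : 0 ≤ y) (hyn : y < n) (hlen : n * n ≤ (rot.length : Int)) :
    chInner n k rot c y
      = (PySem.List.slice rot (some (y * n)) (some ((y + 1) * n))).foldl (chStep k c) (some 0) := by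
  have hn : 0 < n := lt_of_le_of_lt hy0 hyn
  have hyn' : 0 ≤ y * n := mul_nonneg hy0 (le_of_lt hn)
  have hrow : (y + 1) * n ≤ n * n :=
    mul_le_mul_of_nonneg_right (by omega) (le_of_lt hn)
  have heq : (y + 1) * n = y * n + n := by ring
  have hbound : y * n + (((n - 0).toNat : Nat) : Int) ≤ (rot.length : Int) := by
    have h1 : ((n - 0).toNat : Int) = n := by omega
    rw [h1]; omega
  unfold chInner
  rw [PySem.List.pyRange_one, List.foldl_map]
  simp only [tr, Int.zero_add]
  rw [← List.foldl_map (f := fun (i : Nat) => PySem.List.pyGetD rot (y * n + (i : Int)) "")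
        (g := chStep k c)]
  rw [map_get_range rot (y * n) ((n - 0).toNat) hyn' hbound]
  rw [PySem.List.slice_toNat _ hyn' (by positivity)]
  have hn' : (0:Int) ≤ n := le_of_lt hn
  have h2 : (n - 0).toNat = ((y + 1) * n).toNat - (y * n).toNat := by omega
  rw [h2]

-- Bool.any respects pointwise equality on the list's members
lemma any_congr_mem (l : List Int) (f g : Int → Bool) (h : ∀ x ∈ l, f x = g x) :
    l.any f = l.any g := by
  induction l with
  | nil => rfl
  | cons a t ih =>
    simp only [List.any_cons]
    rw [h a (by simp), ih (fun x hx => h x (by simp [hx]))]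

-- ===== VERDICT (by name: the statement is the Claim_ definition above) =====
theorem check_horiz_spec : Claim_equal_check_horiz := by
  intro n k rot c _hdom hpre
  unfold Spec_check_horiz check_horiz check_horiz_alt
  by_cases hn : 0 < n
  · have hlen2 : n * n ≤ (rot.length : Int) := by
      rcases hpre with h | h
      · omega
      · exact h
    by_cases hk : k ≤ 0
    · rw [if_pos hk, List.any_eq_false]
      intro y hy
      have hb := (PySem.List.mem_pyRange_one).1 hy
      rw [chInner_eq_row n k rot c y (by omega) (by omega) hlen2]
      simp [foldl_chStep_kle k c hk _ 0 le_rfl]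
    · rw [if_neg hk]
      have hk1 : 1 ≤ k := by omega
      apply any_congr_mem
      intro y hy
      have hb := (PySem.List.mem_pyRange_one).1 hy
      rw [chInner_eq_row n k rot c y (by omega) (by omega) hlen2]
      set row := PySem.List.slice rot (some (y * n)) (some ((y + 1) * n)) with hrow
      rw [foldl_chStep_eq k c hk1 row 0 le_rfl (by omega)]
      simpa using row_has_run_char c k hk1 row
  · rw [PySem.List.pyRange_one_eq_nil (by omega)]
    simp
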